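-- pv_equiv track=rewrite | github.com/CubedCard/adventofcode | 2023/day-3/solution.py | get_adjacent_digits
-- ===== SOURCE A (Python) =====
-- def get_adjacent_digits(grid, row, col):
--     current_digit = grid[row][col]
--     neighbors = [current_digit]
--
--     # Check left neighbors
--     for c in range(col - 1, -1, -1):
--         if grid[row][c].isdigit():
--             neighbors.insert(0, grid[row][c])  # Insert at the beginning to maintain order
--         else:
--             break  # Stop if we encounter a non-digit character
--
--     # Check right neighbors
--     for c in range(col + 1, len(grid[row])):
--         if grid[row][c].isdigit():
--             neighbors.append(grid[row][c])
--         else: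
--             break  # Stop if we encounter a non-digit character
--
--     return ''.join(neighbors)
-- ===== SOURCE B (Python) =====
-- def get_adjacent_digits(grid, row, col):
--     r = grid[row]
--     start = col
--     while start - 1 >= 0 and r[start - 1].isdigit():
--         start -= 1
--     end = col
--     while end + 1 < len(r) and r[end + 1].isdigit():
--         end += 1
--     return ''.join(r[start:end + 1])
-- ===== Notes on version B (the rewrite author's own statement) =====
-- stated objective: simpler
-- what changed: B computes the number's index span with two while-loops over indices and returns one join of a single row slice, instead of A's neighbor list built element-by-element with insert(0, .) and append over two range scans.
-- outside the precondition, e.g. on get_adjacent_digits([['1', '2']], 0, -1): A returns '212', B returns '2'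
import Mathlib
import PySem

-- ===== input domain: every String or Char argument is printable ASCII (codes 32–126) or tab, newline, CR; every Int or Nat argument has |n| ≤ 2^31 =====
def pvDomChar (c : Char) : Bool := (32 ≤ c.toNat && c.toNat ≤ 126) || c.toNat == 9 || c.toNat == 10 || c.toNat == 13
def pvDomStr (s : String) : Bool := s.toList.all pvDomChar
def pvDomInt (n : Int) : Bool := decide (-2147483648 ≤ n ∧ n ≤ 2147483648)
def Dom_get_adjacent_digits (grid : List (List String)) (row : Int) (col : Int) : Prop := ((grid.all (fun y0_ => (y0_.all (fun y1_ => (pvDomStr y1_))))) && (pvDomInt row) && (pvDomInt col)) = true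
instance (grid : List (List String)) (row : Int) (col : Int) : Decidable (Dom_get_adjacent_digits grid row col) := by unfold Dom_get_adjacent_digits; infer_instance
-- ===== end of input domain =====

-- B replaces A's element-by-element neighbor list (insert(0,.)/append over two range scans)
-- by an index span (two while loops) and a single row slice joined once: simpler, one join.

-- ===== PORT A =====
-- left scan: 'for c in range(col-1, -1, -1): if digit insert(0, .) else break'
def aLeft (r : List String) : List Int → List String → List String
  | [], acc => acc
  | c :: cs, acc =>
      if PySem.Str.strIsdigit (PySem.List.pyGetD r c "") then
        aLeft r cs (PySem.List.pyGetD r c "" :: acc)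
      else acc

-- right scan: 'for c in range(col+1, len(row)): if digit append else break'
def aRight (r : List String) : List Int → List String → List String
  | [], acc => acc
  | c :: cs, acc =>
      if PySem.Str.strIsdigit (PySem.List.pyGetD r c "") then
        aRight r cs (acc ++ [PySem.List.pyGetD r c ""])
      else acc

def get_adjacent_digits (grid : List (List String)) (row : Int) (col : Int) : String :=
  let r := PySem.List.pyGetD grid row []
  let current := PySem.List.pyGetD r col ""
  let neighbors := [current]
  let neighbors := aLeft r (PySem.List.pyRange (col - 1) (-1) (-1)) neighbors
  let neighbors := aRight r (PySem.List.pyRange (col + 1) (r.length : Int)  1) neighbors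
  PySem.Str.join "" neighbors

-- ===== PORT B =====
-- 'while start-1 >= 0 and r[start-1].isdigit(): start -= 1' (fuel only for totality)
def bStart (r : List String) : Nat → Int → Int
  | 0, s => s
  | f + 1, s =>
      if 1 ≤ s ∧ PySem.Str.strIsdigit (PySem.List.pyGetD r (s - 1) "") then bStart r f (s - 1)
      else s

-- 'while end+1 < len(r) and r[end+1].isdigit(): end += 1' (fuel only for totality)
def bEnd (r : List String) : Nat → Int → Int
  | 0, e => e
  | f + 1, e =>
      if e + 1 < (r.length : Int) ∧ PySem.Str.strIsdigit (PySem.List.pyGetD r (e + 1) "") then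
        bEnd r f (e + 1)
      else e

def get_adjacent_digits_alt (grid : List (List String)) (row : Int) (col : Int) : String :=
  let r := PySem.List.pyGetD grid row []
  let start := bStart r col.toNat col
  let stop := bEnd r (r.length + (-col).toNat + 1) col
  PySem.Str.join "" (PySem.List.slice r (some start) (some (stop + 1)))

-- ===== PRECONDITION & SPEC =====
-- Pre_ excludes (a) row/col raising IndexError and (b) negative in-range col, where A returns a
-- value only through Python's negative-index wraparound (center char taken from the end while the
-- right scan restarts at index 0) — an accidental corner no natural slice-based B matches.
def Pre_get_adjacent_digits (grid : List (List String)) (row : Int) (col : Int) : Prop :=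
  PySem.Raise.InRange grid.length row ∧ 0 ≤ col ∧ col < ((PySem.List.pyGetD grid row []).length : Int)
instance (grid : List (List String)) (row : Int) (col : Int) : Decidable (Pre_get_adjacent_digits grid row col) := by unfold Pre_get_adjacent_digits; infer_instance

def pvWitness_get_adjacent_digits : List (List String) × Int × Int :=
  ([["4", "6", "7", "."], [".", "1", "*", "2"]], 0, 2)

def Spec_get_adjacent_digits (grid : List (List String)) (row : Int) (col : Int) (out : String) : Prop := out = get_adjacent_digits_alt grid row col
instance (grid : List (List String)) (row : Int) (col : Int) (out : String) : Decidable (Spec_get_adjacent_digits grid row col out) := by unfold Spec_get_adjacent_digits; infer_instance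

-- ===== CLAIM (what is proved, stated in full; the proofs are below) =====
def Claim_equal_get_adjacent_digits : Prop := ∀ (grid : List (List String)) (row : Int) (col : Int), Dom_get_adjacent_digits grid row col → Pre_get_adjacent_digits grid row col → Spec_get_adjacent_digits grid row col (get_adjacent_digits grid row col)

-- ===== LEMMAS AND PROOFS =====

-- Nat-indexed versions of B's two loops (proof-side only)
def natStart (r : List String) : Nat → Nat
  | 0 => 0
  | s + 1 => if PySem.Str.strIsdigit (PySem.List.pyGetD r ((s : Nat) : Int) "") then natStart r s else s + 1

def natEnd (r : List String) : Nat → Nat → Nat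
  | 0, e => e
  | f + 1, e =>
      if e + 1 < r.length ∧ PySem.Str.strIsdigit (PySem.List.pyGetD r (((e + 1 : Nat)) : Int) "") then
        natEnd r f (e + 1)
      else e

theorem bStart_eq (r : List String) : ∀ c : Nat, bStart r c (c : Int) = ((natStart r c : Nat) : Int) := by
  intro c
  induction c with
  | zero => simp [bStart, natStart]
  | succ s ih =>
      have h1 : ((s + 1 : Nat) : Int) - 1 = (s : Int) := by push_cast; ring
      have ht : (1 : Int) ≤ ((s + 1 : Nat) : Int) := by push_cast; omega
      rw [bStart, natStart, h1]
      split_ifs with hA hB hB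
      · exact ih
      · exact absurd hA.2 hB
      · exact absurd ⟨ht, hB⟩ hA
      · rfl

theorem bEnd_eq (r : List String) : ∀ (f : Nat) (e : Nat), bEnd r f (e : Int) = ((natEnd r f e : Nat) : Int) := by
  intro f
  induction f with
  | zero => intro e; simp [bEnd, natEnd]
  | succ f ih =>
      intro e
      have h1 : ((e : Int)) + 1 = ((e + 1 : Nat) : Int) := by push_cast; ring
      rw [bEnd, natEnd, h1]
      split_ifs with hA hB hB
      · exact ih (e + 1)
      · exact absurd ⟨by exact_mod_cast hA.1, hA.2⟩ hB
      · exact absurd ⟨by exact_mod_cast hB.1, hB.2⟩ hA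
      · rfl

theorem natStart_le (r : List String) : ∀ c, natStart r c ≤ c := by
  intro c
  induction c with
  | zero => simp [natStart]
  | succ s ih => rw [natStart]; split_ifs <;> omega

theorem natEnd_ge (r : List String) : ∀ f e, e ≤ natEnd r f e := by
  intro f
  induction f with
  | zero => intro e; simp [natEnd]
  | succ f ih =>
      intro e; rw [natEnd]; split_ifs with h
      · have := ih (e + 1); omega
      · omega

theorem natEnd_lt (r : List String) : ∀ f e, e < r.length → natEnd r f e < r.length := by
  intro f
  induction f with
  | zero => intro e he; simpa [natEnd] using he
  | succ f ih =>
      intro e he; rw [natEnd]; split_ifs with h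
      · exact ih (e + 1) h.1
      · exact he

theorem aLeft_eq (r : List String) : ∀ (c : Nat), c ≤ r.length → ∀ acc,
    aLeft r (PySem.List.pyRange ((c : Int) - 1) (-1) (-1)) acc
      = (r.drop (natStart r c)).take (c - natStart r c) ++ acc := by
  intro c
  induction c with
  | zero =>
      intro _ acc
      rw [PySem.List.pyRange_neg_one_eq_nil (by norm_num)]
      simp [aLeft, natStart]
  | succ s ih =>
      intro hc acc
      have hs : s < r.length := by omega
      have h1 : ((s + 1 : Nat) : Int) - 1 = (s : Int) := by push_cast; ring
      rw [h1, PySem.List.pyRange_neg_one_cons (by omega)]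
      rw [aLeft]
      by_cases hd : PySem.Str.strIsdigit (PySem.List.pyGetD r ((s : Nat) : Int) "")
      · rw [if_pos hd, ih (by omega)]
        have hb : natStart r (s + 1) = natStart r s := by rw [natStart, if_pos hd]
        have hble : natStart r s ≤ s := natStart_le r s
        rw [hb]
        set b := natStart r s with hbdef
        have hsb : s + 1 - b = (s - b) + 1 := by omega
        rw [hsb, List.take_add_one]
        have hget : (r.drop b)[s - b]? = some r[s] := by
          rw [List.getElem?_drop]
          have : b + (s - b) = s := by omega
          rw [this]
          exact List.getElem?_eq_getElem hs
        have hval : PySem.List.pyGetD r ((s : Nat) : Int) "" = r[s] := by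
          rw [PySem.List.pyGetD_natCast]
          exact List.getD_eq_getElem r "" hs
        rw [hget, hval]
        simp
      · rw [if_neg hd]
        have hb : natStart r (s + 1) = s + 1 := by rw [natStart, if_neg hd]
        rw [hb]
        simp

theorem aRight_eq (r : List String) : ∀ (f : Nat) (e : Nat), e < r.length → r.length ≤ e + 1 + f → ∀ acc,
    aRight r (PySem.List.pyRange ((e : Int) + 1) (r.length : Int) 1) acc
      = acc ++ (r.drop (e + 1)).take (natEnd r f e - e) := by
  intro f
  induction f with
  | zero =>
      intro e he hf acc
      rw [PySem.List.pyRange_one_eq_nil (by omega)]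
      simp [aRight, natEnd]
  | succ f ih =>
      intro e he hf acc
      by_cases hlt : e + 1 < r.length
      · rw [PySem.List.pyRange_one_cons (by omega)]
        rw [aRight]
        have h1 : ((e : Int)) + 1 = ((e + 1 : Nat) : Int) := by push_cast; ring
        have hval : PySem.List.pyGetD r ((e : Int) + 1) "" = r[e + 1] := by
          rw [h1, PySem.List.pyGetD_natCast]
          exact List.getD_eq_getElem r "" hlt
        by_cases hd : PySem.Str.strIsdigit (PySem.List.pyGetD r ((e : Int) + 1) "")
        · rw [if_pos hd]
          have h2 : (e : Int) + 1 + 1 = ((e + 1 : Nat) : Int) + 1 := by push_cast; ring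
          rw [h2, ih (e + 1) hlt (by omega)]
          have hE : natEnd r (f + 1) e = natEnd r f (e + 1) := by
            rw [natEnd, if_pos ⟨hlt, by rw [← h1]; exact hd⟩]
          rw [hE]
          set E := natEnd r f (e + 1) with hEdef
          have hEge : e + 1 ≤ E := natEnd_ge r f (e + 1)
          have hdropeq : r.drop (e + 1) = r[e + 1] :: r.drop (e + 2) := by
            rw [List.drop_eq_getElem_cons hlt]
          have hEm : E - e = (E - (e + 1)) + 1 := by omega
          rw [hdropeq, hEm, List.take_succ_cons, hval]
          simp
        · rw [if_neg hd]
          have hE : natEnd r (f + 1) e = e := by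
            rw [natEnd, if_neg]
            intro hcontra
            exact hd (by rw [h1]; exact hcontra.2)
          rw [hE]
          simp
      · rw [PySem.List.pyRange_one_eq_nil (by omega)]
        have hE : natEnd r (f + 1) e = e := by
          rw [natEnd, if_neg]; intro hcontra; exact hlt hcontra.1
        rw [hE]
        simp [aRight]

-- ===== VERDICT (by name: the statement is the Claim_ definition above) =====
theorem get_adjacent_digits_spec : Claim_equal_get_adjacent_digits := by
  intro grid row col _ hpre
  obtain ⟨hrow, hc0, hclen⟩ := hpre
  unfold Spec_get_adjacent_digits
  simp only [get_adjacent_digits, get_adjacent_digits_alt]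
  set r := PySem.List.pyGetD grid row [] with hr
  obtain ⟨n, hn⟩ : ∃ n : Nat, col = (n : Int) := ⟨col.toNat, (Int.toNat_of_nonneg hc0).symm⟩
  subst hn
  have hnlen : n < r.length := by exact_mod_cast hclen
  -- left loop of A
  have hcur : PySem.List.pyGetD r ((n : Nat) : Int) "" = r[n] := by
    rw [PySem.List.pyGetD_natCast]; exact List.getD_eq_getElem r "" hnlen
  have hL := aLeft_eq r n (by omega) [r[n]]
  -- right loop of A (fuel matching B's port: r.length + 1)
  have hR := aRight_eq r (r.length + (-(n : Int)).toNat + 1) n hnlen (by omega)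

  -- B's loops reduce to the Nat versions
  have hbs : bStart r ((n : Int)).toNat (n : Int) = ((natStart r n : Nat) : Int) := by
    have : ((n : Int)).toNat = n := by omega
    rw [this]; exact bStart_eq r n
  have hbe : bEnd r (r.length + (-(n : Int)).toNat + 1) (n : Int)
      = ((natEnd r (r.length + (-(n : Int)).toNat + 1) n : Nat) : Int) := bEnd_eq r _ n
  set F := r.length + (-(n : Int)).toNat + 1 with hF
  set b := natStart r n with hbdef
  set E := natEnd r F n with hEdef
  have hble : b ≤ n := natStart_le r n
  have hEge : n ≤ E := natEnd_ge r F n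
  have hElt : E < r.length := natEnd_lt r F n hnlen
  rw [hcur, hL, hR, hbs, hbe]
  -- B's slice
  have hstop : ((E : Nat) : Int) + 1 = ((E + 1 : Nat) : Int) := by push_cast; ring
  rw [hstop, PySem.List.slice_natCast]
  -- both sides are the join of the same list
  congr 1
  have hsplit : E + 1 - b = (n - b) + (1 + (E - n)) := by omega
  rw [hsplit, List.take_add]
  have hdd : (r.drop b).drop (n - b) = r.drop n := by
    rw [List.drop_drop]
    congr 1
    omega
  rw [hdd, Nat.add_comm 1 (E - n), List.drop_eq_getElem_cons hnlen, List.take_succ_cons,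
    List.append_assoc, List.singleton_append]
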